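-- pv_equiv track=rewrite | github.com/agbofred/agbofred.github.io | Spring_2025/Lecture/hw_s1/ps4/Solutions/Practice.py | to_obenglobish
-- ===== SOURCE A (Python) =====
-- def to_obenglobish(word):
--     def is_previous_letter_vowel(index):
--         if index == 0:
--             return False
--         else:
--             return word[index-1] in "aeiou"
--
--     def is_final_e(index):
--         return (word[index] == "e" and index == len(word)-1)
--
--     translation = ""
--     for i in range(len(word)):
--         if word[i] in "aeiou":
--             if not (is_previous_letter_vowel(i) or is_final_e(i)):
--                 translation += "ob" + word[i]
--             else:
--                 translation += word[i]
--         else: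
--             translation += word[i]
--     return translation
-- ===== SOURCE B (Python) =====
-- import re
--
-- _OB_RE = re.compile(r'(?<![aeiou])(?:[aiou]|e(?!\Z))')
--
-- def to_obenglobish(word):
--     return _OB_RE.sub(lambda m: 'ob' + m.group(0), word)
-- ===== Notes on version B (the rewrite author's own statement) =====
-- stated objective: idiomatic
-- what changed: Replaced the index loop with its two helper predicates and string concatenation by a single precompiled regex substitution whose pattern matches qualifying vowels directly (negative lookbehind for a preceding vowel, lookahead excluding a final e), letting the regex engine do the scan.
import Mathlib
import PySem

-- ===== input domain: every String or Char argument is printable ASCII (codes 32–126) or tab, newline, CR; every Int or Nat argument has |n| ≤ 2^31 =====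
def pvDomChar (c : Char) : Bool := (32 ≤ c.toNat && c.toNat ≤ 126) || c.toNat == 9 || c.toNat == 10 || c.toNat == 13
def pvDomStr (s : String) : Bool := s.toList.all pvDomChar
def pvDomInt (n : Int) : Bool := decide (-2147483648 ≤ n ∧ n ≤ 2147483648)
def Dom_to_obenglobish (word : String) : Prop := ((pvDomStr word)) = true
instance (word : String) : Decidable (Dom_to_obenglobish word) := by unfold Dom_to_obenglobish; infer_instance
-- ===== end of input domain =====

-- B replaces A's index loop with its two helper predicates by a single regex substitution;
-- the proof shows the return values agree on every string in the domain.

-- ===== PORT A =====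
-- is_previous_letter_vowel: word[index-1] is in range whenever the loop calls this (index ≥ 1),
-- so pyGetD's default is never returned; 'word[index-1] in "aeiou"' on the 1-char string is
-- exactly membership of that char in the vowel list.
def aIsPrevVowel (cs : List Char) (index : Int) : Bool :=
  if index = 0 then false
  else decide (PySem.List.pyGetD cs (index - 1) ' ' ∈ "aeiou".toList)

-- is_final_e
def aIsFinalE (cs : List Char) (index : Int) : Bool :=
  PySem.List.pyGetD cs index ' ' == 'e' && index == (cs.length : Int) - 1

-- the for-loop over range(len(word)), accumulating 'translation' (as a char list; String.ofList at the end)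
def to_obenglobish (word : String) : String :=
  let cs := word.toList
  String.ofList ((PySem.List.pyRange 0 (cs.length : Int) 1).foldl
    (fun tr i =>
      let c := PySem.List.pyGetD cs i ' '
      if c ∈ "aeiou".toList then
        if !(aIsPrevVowel cs i || aIsFinalE cs i) then tr ++ ['o', 'b', c]
        else tr ++ [c]
      else tr ++ [c]) [])

-- ===== PORT B =====
-- Hand-port of re.sub with pattern (?<![aeiou])(?:[aiou]|e(?!\Z)): every match is a single
-- character, so re.sub's left-to-right scan of the original string is exactly this pass that
-- knows the previous character (the lookbehind) and whether the rest is empty (the \Z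
-- lookahead); exact for this pattern.
def bVowel (prev : Option Char) : Bool :=       -- the (?<![aeiou]) lookbehind (false at position 0)
  match prev with
  | some p => decide (p ∈ "aeiou".toList)
  | none => false

def bGo (prev : Option Char) : List Char → List Char
  | [] => []
  | c :: rest =>
    let m : Bool := decide (c ∈ "aiou".toList) || (c == 'e' && !(rest.isEmpty))
    (if m && !(bVowel prev) then ['o', 'b', c] else [c]) ++ bGo (some c) rest

def to_obenglobish_alt (word : String) : String :=
  String.ofList (bGo none word.toList)

-- ===== PRECONDITION & SPEC =====
def Spec_to_obenglobish (word : String) (out : String) : Prop := out = to_obenglobish_alt word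
instance (word : String) (out : String) : Decidable (Spec_to_obenglobish word out) := by unfold Spec_to_obenglobish; infer_instance

-- ===== CLAIM (what is proved, stated in full; the proofs are below) =====
def Claim_equal_to_obenglobish : Prop := ∀ (word : String), Dom_to_obenglobish word → Spec_to_obenglobish word (to_obenglobish word)

-- ===== LEMMAS AND PROOFS =====

theorem getD_mid (pre rest : List Char) (c : Char) :
    PySem.List.pyGetD (pre ++ c :: rest) (pre.length : Int) ' ' = c := by
  simp [PySem.List.pyGetD_natCast, List.getD_eq_getElem?_getD]

theorem prevVowel_eq (pre rest : List Char) (c : Char) :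
    aIsPrevVowel (pre ++ c :: rest) (pre.length : Int) = bVowel pre.getLast? := by
  rcases List.eq_nil_or_concat pre with rfl | ⟨ps, q, rfl⟩
  · simp [aIsPrevVowel, bVowel]
  · rw [List.concat_eq_append]
    have hne : ((ps ++ [q]).length : Int) ≠ 0 := by simp; omega
    have hidx : (((ps ++ [q]).length : Int) - 1) = ((ps.length : Nat) : Int) := by simp
    simp only [aIsPrevVowel, if_neg hne, hidx, PySem.List.pyGetD_natCast, List.append_assoc,
      List.singleton_append, List.getD_eq_getElem?_getD, List.getLast?_concat]
    simp [bVowel]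

theorem finalE_eq (pre rest : List Char) (c : Char) :
    aIsFinalE (pre ++ c :: rest) (pre.length : Int) = (c == 'e' && rest.isEmpty) := by
  unfold aIsFinalE
  rw [getD_mid]
  rcases rest with _ | ⟨r, rs⟩
  · simp
  · simp
    intro _
    omega

-- A's per-character branch emits exactly B's per-match piece
theorem piece_eq (c : Char) (rest tr : List Char) (lb : Bool) :
    (if c ∈ "aeiou".toList then
       if !(lb || (c == 'e' && rest.isEmpty)) then tr ++ ['o', 'b', c] else tr ++ [c]
     else tr ++ [c])
    = tr ++ ((if (decide (c ∈ "aiou".toList) || (c == 'e' && !(rest.isEmpty))) && !lb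
       then ['o', 'b', c] else [c])) := by
  have hQE : ¬(c ∈ "aiou".toList ∧ c = 'e') := by
    rintro ⟨h, rfl⟩
    revert h; decide
  by_cases hq : c ∈ "aiou".toList <;> by_cases he : c = 'e' <;>
    cases lb <;> cases hre : rest.isEmpty <;>
      simp_all

-- loop invariant: A's loop over the remaining indices equals B's scan of the remaining suffix,
-- the lookbehind being the last character already consumed
theorem to_obenglobish_main (suf : List Char) : ∀ (pre tr : List Char),
    (PySem.List.pyRange (pre.length : Int) ((pre.length + suf.length : Nat) : Int) 1).foldl
      (fun tr i =>
        let c := PySem.List.pyGetD (pre ++ suf) i ' '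
        if c ∈ "aeiou".toList then
          if !(aIsPrevVowel (pre ++ suf) i || aIsFinalE (pre ++ suf) i) then tr ++ ['o', 'b', c]
          else tr ++ [c]
        else tr ++ [c]) tr
    = tr ++ bGo pre.getLast? suf := by
  induction suf with
  | nil =>
    intro pre tr
    simp [bGo, PySem.List.pyRange]
  | cons c rest ih =>
    intro pre tr
    have hlt : (pre.length : Int) < ((pre.length + (c :: rest).length : Nat) : Int) := by
      simp
    rw [PySem.List.pyRange_one_cons hlt]
    simp only [List.foldl_cons, getD_mid, prevVowel_eq, finalE_eq]
    rw [piece_eq]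
    have hlist : pre ++ c :: rest = (pre ++ [c]) ++ rest := by simp
    have e1 : (pre.length : Int) + 1 = (((pre ++ [c]).length : Nat) : Int) := by simp
    have e2 : ((pre.length + (c :: rest).length : Nat) : Int)
        = (((pre ++ [c]).length + rest.length : Nat) : Int) := by
      simp; omega
    rw [hlist, e1, e2, ih]
    simp [bGo]

-- ===== VERDICT (by name: the statement is the Claim_ definition above) =====
theorem to_obenglobish_spec : Claim_equal_to_obenglobish := by
  intro word _
  unfold Spec_to_obenglobish to_obenglobish to_obenglobish_alt
  have h := to_obenglobish_main word.toList [] []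
  simpa using congrArg String.ofList h
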